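-- pv_equiv track=rewrite | github.com/MrCosta57/TitleQuill | script/keyword_plots.py | dict_to_comulative
-- ===== SOURCE A (Python) =====
-- from typing import Dict, TypeVar
--
-- T = TypeVar('T')
--
-- def dict_to_comulative(dict_: Dict[T, int]) -> Dict[T, int]:
--     ''' Transpose a count dictionary into a cumulative-count dictionary '''
--
--     sorted_keys     = sorted(dict_.keys())
--     cumulative_sum  = 0
--     cumulative_dict = {k: 0 for k in sorted_keys}
--
--     # Iterate over the sorted keys and calculate the cumulative sum
--     # NOTE : We do it in reverse order to have the cumulative sum at the end
--     # TODO : Is this the best view to do it?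
--     for key in sorted_keys[::-1]:
--         cumulative_sum       += dict_[key]
--         cumulative_dict[key]  = cumulative_sum
--
--     return cumulative_dict
-- ===== SOURCE B (Python) =====
-- from typing import Dict, TypeVar
--
-- T = TypeVar('T')
--
-- def dict_to_comulative(dict_: Dict[T, int]) -> Dict[T, int]:
--     ''' Transpose a count dictionary into a cumulative-count dictionary '''
--     total = sum(dict_.values())
--     result = {}
--     prefix = 0
--     for key in sorted(dict_):
--         result[key] = total - prefix
--         prefix += dict_[key]
--     return result
-- ===== Notes on version B (the rewrite author's own statement) =====
-- stated objective: simpler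
-- what changed: Single forward pass over the sorted keys with a precomputed total and a running prefix sum (result[key] = total - prefix), instead of A's two passes: pre-filling a zero dict and then a reverse-order suffix accumulation.
import Mathlib
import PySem

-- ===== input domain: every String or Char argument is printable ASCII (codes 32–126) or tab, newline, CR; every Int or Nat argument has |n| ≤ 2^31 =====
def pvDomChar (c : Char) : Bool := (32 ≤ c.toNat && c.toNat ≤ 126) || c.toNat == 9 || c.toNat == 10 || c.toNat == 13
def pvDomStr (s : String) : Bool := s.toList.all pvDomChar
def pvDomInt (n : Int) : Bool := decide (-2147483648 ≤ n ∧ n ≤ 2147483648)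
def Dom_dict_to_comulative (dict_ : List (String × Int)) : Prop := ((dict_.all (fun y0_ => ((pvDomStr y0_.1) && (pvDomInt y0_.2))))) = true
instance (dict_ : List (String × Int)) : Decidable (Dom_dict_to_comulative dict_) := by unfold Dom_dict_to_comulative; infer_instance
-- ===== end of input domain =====

-- B replaces A's zero-prefill + reverse suffix accumulation by one forward pass with a
-- precomputed total and a running prefix sum (simpler decomposition, same cost).


-- ===== PORT A =====
def dict_to_comulative (dict_ : List (String × Int)) : List (String × Int) :=
  let d := PySem.Dict.ofList dict_
  let sorted_keys := PySem.List.sorted d.keys (fun k => k) false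
  -- cumulative_dict = {k: 0 for k in sorted_keys}
  let cumulative_dict := sorted_keys.foldl (fun cd k => cd.insert k (0 : Int)) PySem.Dict.empty
  -- for key in sorted_keys[::-1]: cumulative_sum += dict_[key]; cumulative_dict[key] = cumulative_sum
  let st := ((PySem.List.slice? sorted_keys none none (-1)).getD []).foldl
    (fun (st : Int × PySem.Dict String Int) key =>
      let s := st.1 + d.getD key 0          -- dict_[key]: key always present, never raises
      (s, st.2.insert key s))
    ((0 : Int), cumulative_dict)
  st.2.items

-- ===== PORT B =====
def dict_to_comulative_alt (dict_ : List (String × Int)) : List (String × Int) :=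
  let d := PySem.Dict.ofList dict_
  let total := d.values.foldl (· + ·) (0 : Int)  -- sum(dict_.values())
  -- result = {}; prefix = 0; for key in sorted(dict_): result[key] = total - prefix; prefix += dict_[key]
  let st := (PySem.List.sorted d.keys (fun k => k) false).foldl
    (fun (st : PySem.Dict String Int × Int) key =>
      (st.1.insert key (total - st.2), st.2 + d.getD key 0))
    (PySem.Dict.empty, (0 : Int))
  st.1.items

-- ===== PRECONDITION & SPEC =====
def Spec_dict_to_comulative (dict_ : List (String × Int)) (out : List (String × Int)) : Prop := out = dict_to_comulative_alt dict_
instance (dict_ : List (String × Int)) (out : List (String × Int)) : Decidable (Spec_dict_to_comulative dict_ out) := by unfold Spec_dict_to_comulative; infer_instance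

-- ===== CLAIM (what is proved, stated in full; the proofs are below) =====
def Claim_equal_dict_to_comulative : Prop := ∀ (dict_ : List (String × Int)), Dom_dict_to_comulative dict_ → Spec_dict_to_comulative dict_ (dict_to_comulative dict_)

-- ===== LEMMAS AND PROOFS =====

-- A's reverse loop, read back-to-front: the dict after processing the forward list t
def A_upd (f : String → Int) (t : List String) (cd : PySem.Dict String Int) : PySem.Dict String Int :=
  match t with
  | [] => cd
  | k :: t' => (A_upd f t' cd).insert k (f k + (t'.map f).sum)

-- value of key k after A's reverse loop: first occurrence in the forward list wins
def aVal (f : String → Int) (t : List String) (k : String) (dflt : Int) : Int :=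
  match t with
  | [] => dflt
  | k' :: t' => if k = k' then f k' + (t'.map f).sum else aVal f t' k dflt

-- items produced by B's forward loop over t starting at prefix p
def bItems (f : String → Int) (T : Int) (t : List String) (p : Int) : List (String × Int) :=
  match t with
  | [] => []
  | k :: t' => (k, T - p) :: bItems f T t' (p + f k)

lemma A_foldr (f : String → Int) (t : List String) (cd : PySem.Dict String Int) :
    (t.foldr (fun key (st : Int × PySem.Dict String Int) =>
        let s := st.1 + f key
        (s, st.2.insert key s)) ((0 : Int), cd))
    = ((t.map f).sum, A_upd f t cd) := by
  induction t with
  | nil => simp [A_upd]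
  | cons k t ih => simp [A_upd, ih, add_comm]

lemma contains_A_upd (f : String → Int) (t : List String) (cd : PySem.Dict String Int)
    (j : String) (h : cd.contains j = true) : (A_upd f t cd).contains j = true := by
  induction t with
  | nil => simpa [A_upd]
  | cons k t ih => simp [A_upd, PySem.Dict.contains_insert, ih]

lemma keys_A_upd (f : String → Int) (t : List String) (cd : PySem.Dict String Int)
    (h : ∀ k ∈ t, cd.contains k = true) : (A_upd f t cd).keys = cd.keys := by
  induction t with
  | nil => rfl
  | cons k t ih =>
    have hk : (A_upd f t cd).contains k = true :=
      contains_A_upd f t cd k (h k (by simp))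
    rw [A_upd, PySem.Dict.keys_insert_of_contains _ _ hk]
    exact ih (fun j hj => h j (by simp [hj]))

lemma getD_A_upd (f : String → Int) (t : List String) (cd : PySem.Dict String Int)
    (k : String) : (A_upd f t cd).getD k 0 = aVal f t k (cd.getD k 0) := by
  induction t with
  | nil => rfl
  | cons k' t ih => simp [A_upd, aVal, PySem.Dict.getD_insert, ih]

lemma getD_zero_fold (l : List String) (cd : PySem.Dict String Int)
    (h : ∀ j, cd.getD j 0 = 0) (j : String) :
    (l.foldl (fun cd k => cd.insert k (0 : Int)) cd).getD j 0 = 0 := by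
  induction l generalizing cd with
  | nil => exact h j
  | cons k l ih =>
    exact ih _ (fun j' => by rw [PySem.Dict.getD_insert]; split <;> simp [h])

lemma crunch (f : String → Int) (T : Int) (t : List String) (p : Int)
    (hnd : t.Nodup) (hp : p = T - (t.map f).sum) :
    t.map (fun k => (k, aVal f t k 0)) = bItems f T t p := by
  induction t generalizing p with
  | nil => rfl
  | cons k t ih =>
    simp only [List.nodup_cons] at hnd
    simp only [List.map_cons, List.sum_cons] at hp
    rw [List.map_cons, bItems]
    have h1 : aVal f (k :: t) k 0 = f k + (t.map f).sum := by simp [aVal]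
    have h2 : T - p = f k + (t.map f).sum := by omega
    rw [h1, ← h2]
    congr 1
    rw [List.map_congr_left (fun j hj => by
      have hjk : j ≠ k := fun h => hnd.1 (h ▸ hj)
      show (j, aVal f (k :: t) j 0) = (j, aVal f t j 0)
      simp [aVal, hjk])]
    exact ih (p + f k) hnd.2 (by omega)

lemma B_loop (f : String → Int) (T : Int) (t : List String)
    (acc : PySem.Dict String Int) (p : Int)
    (hfresh : ∀ k ∈ t, acc.contains k = false) (hnd : t.Nodup) :
    ((t.foldl (fun (st : PySem.Dict String Int × Int) key =>
        (st.1.insert key (T - st.2), st.2 + f key)) (acc, p)).1).items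
    = acc.items ++ bItems f T t p := by
  induction t generalizing acc p with
  | nil => simp [bItems]
  | cons k t ih =>
    simp only [List.nodup_cons] at hnd
    rw [List.foldl_cons]
    rw [ih (acc.insert k (T - p)) (p + f k)
      (fun j hj => by
        rw [PySem.Dict.contains_insert]
        have hjk : j ≠ k := fun h => hnd.1 (h ▸ hj)
        simp [hjk, hfresh j (by simp [hj])])
      hnd.2]
    rw [PySem.Dict.items_insert_of_not_contains _ _ (hfresh k (by simp))]
    simp [bItems]

-- ===== VERDICT (by name: the statement is the Claim_ definition above) =====
theorem dict_to_comulative_spec : Claim_equal_dict_to_comulative := by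
  intro dict_ _
  unfold Spec_dict_to_comulative
  simp only [dict_to_comulative, dict_to_comulative_alt]
  set d := PySem.Dict.ofList dict_ with hd
  set ks := PySem.List.sorted d.keys (fun k => k) false with hks
  have hkeysnd : d.keys.Nodup := PySem.Dict.nodup_keys_ofList dict_
  have hperm : ks.Perm d.keys := PySem.List.sorted_perm d.keys (fun k => k) false
  have hnd : ks.Nodup := (hperm.nodup_iff).mpr hkeysnd
  set f : String → Int := fun k => d.getD k 0 with hf
  set T : Int := d.values.foldl (· + ·) 0 with hT
  -- total = sum of f over ks
  have hTsum : T = (ks.map f).sum := by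
    rw [hT, ← List.sum_eq_foldl, PySem.Dict.values_eq_map_keys d hkeysnd 0, ← hf]
    exact (List.Perm.sum_eq ((hperm.map f).symm))
  -- the zero dict
  set cd0 := ks.foldl (fun cd k => cd.insert k (0 : Int)) PySem.Dict.empty with hcd0
  have hitems0 : cd0.items = ks.map (fun k => (k, (0 : Int))) := by
    rw [hcd0]
    have := PySem.Dict.items_foldl_insert_fresh (d := PySem.Dict.empty)
      (l := ks) (k := fun a => a) (v := fun _ => (0 : Int))
      (by intro a _; rfl) (by simpa using hnd)
    simpa using this
  have hkeys0 : cd0.keys = ks := by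
    show cd0.items.map (·.1) = ks
    rw [hitems0]; simp [Function.comp_def]
  have hcont0 : ∀ k ∈ ks, cd0.contains k = true := by
    intro k hk
    rw [PySem.Dict.contains_iff_mem_keys, hkeys0]; exact hk
  have hgetD0 : ∀ j, cd0.getD j 0 = 0 := fun j =>
    getD_zero_fold ks PySem.Dict.empty (fun _ => by rfl) j
  -- A's reverse loop as a foldr over ks
  rw [PySem.List.slice?_none_none_neg_one, Option.getD_some, List.foldl_reverse]
  have hA : (ks.foldr (fun key (st : Int × PySem.Dict String Int) =>
      (st.1 + d.getD key 0, st.2.insert key (st.1 + d.getD key 0))) ((0 : Int), cd0))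
      = ((ks.map f).sum, A_upd f ks cd0) := A_foldr f ks cd0
  rw [show (fun (x : String) (y : Int × PySem.Dict String Int) =>
        (fun (st : Int × PySem.Dict String Int) key =>
          let s := st.1 + d.getD key 0
          (s, st.2.insert key s)) y x)
      = (fun key (st : Int × PySem.Dict String Int) =>
          (st.1 + d.getD key 0, st.2.insert key (st.1 + d.getD key 0))) from rfl, hA]
  -- A's dict, characterized
  have hAkeys : (A_upd f ks cd0).keys = ks := by rw [keys_A_upd f ks cd0 hcont0, hkeys0]
  have hAitems : (A_upd f ks cd0).items = ks.map (fun k => (k, aVal f ks k 0)) := by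
    rw [PySem.Dict.items_eq_map_keys (A_upd f ks cd0) (by rw [hAkeys]; exact hnd) 0, hAkeys]
    exact List.map_congr_left (fun k _ => by rw [getD_A_upd, hgetD0 k])
  -- B's loop
  rw [show (fun (st : PySem.Dict String Int × Int) key =>
        (st.1.insert key (T - st.2), st.2 + d.getD key 0))
      = (fun (st : PySem.Dict String Int × Int) key =>
        (st.1.insert key (T - st.2), st.2 + f key)) from rfl]
  rw [B_loop f T ks PySem.Dict.empty 0 (fun k _ => rfl) hnd]
  rw [show (PySem.Dict.empty : PySem.Dict String Int).items = [] from rfl, List.nil_append]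
  rw [hAitems]
  exact crunch f T ks 0 hnd (by omega)
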